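-- pv_equiv track=rewrite | github.com/wang1028-yu/darpa_management | merge.py | generate_node_dict
-- ===== SOURCE A (Python) =====
-- def generate_node_dict(node_dict):
--     node_set = set()
--     # 唯一id对应uuid的字典
--     uuid_id_dict = dict()
--     # uuid对应名称的字典
--     uuid_name_dict = dict()
--     # 唯一id对应name的字典
--     id_name_dict = dict()
--     count = 0
--     for item in node_dict:
--         key = item
--         value = node_dict[item]
--         if (value in node_set) == False:
--             node_set.add(value)
--             id_name_dict[value] = count
--             count += 1
--         uuid_name_dict[key] = value
--         uuid_id_dict[key] = id_name_dict[uuid_name_dict[key]]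
--     return uuid_id_dict, uuid_name_dict, id_name_dict
-- ===== SOURCE B (Python) =====
-- def generate_node_dict(node_dict):
--     # Closed-form ids instead of a running counter + seen-set: the id of a name is
--     # the number of distinct names occurring strictly before its first occurrence.
--     names = list(node_dict.values())
--     uuid_name_dict = dict(node_dict)
--     id_name_dict = {v: len(set(names[:names.index(v)])) for v in dict.fromkeys(names)}
--     uuid_id_dict = {k: id_name_dict[v] for k, v in node_dict.items()}
--     return uuid_id_dict, uuid_name_dict, id_name_dict
-- ===== Notes on version B (the rewrite author's own statement) =====
-- stated objective: alternative
-- what changed: Replaces A's single fused loop carrying a seen-set, an explicit counter and three dicts with comprehensions in which each id is a per-value closed form -- len(set(names[:names.index(v)])) over the deduplicated value list -- so no loop-carried state exists at all; this trades A's linear loop for a quadratic but stateless formulation.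
import Mathlib
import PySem

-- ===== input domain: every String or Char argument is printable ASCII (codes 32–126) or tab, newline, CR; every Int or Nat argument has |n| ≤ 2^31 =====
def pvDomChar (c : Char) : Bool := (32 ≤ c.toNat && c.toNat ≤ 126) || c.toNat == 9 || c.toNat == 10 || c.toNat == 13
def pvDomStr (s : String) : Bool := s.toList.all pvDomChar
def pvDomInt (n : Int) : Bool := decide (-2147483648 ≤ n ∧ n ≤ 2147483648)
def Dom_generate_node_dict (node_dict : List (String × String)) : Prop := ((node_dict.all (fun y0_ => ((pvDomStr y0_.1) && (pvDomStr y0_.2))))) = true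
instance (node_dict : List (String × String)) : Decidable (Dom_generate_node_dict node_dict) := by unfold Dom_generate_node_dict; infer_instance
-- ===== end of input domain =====

-- B replaces A's single fused loop (seen-set + running counter + three dicts built together) by
-- stateless comprehensions in which each id is the closed form len(set(names[:names.index(v)])).

-- ===== PORT A =====
-- A's loop body as a helper: node_dict[item] is a lookup in the dict (the key is always present under
-- Pre_, so the KeyError branch is unreachable and getD "" is exact); the id_name_dict[...] and
-- uuid_name_dict[key] lookups likewise always succeed, so their getD defaults are unreachable too.
def bodyA (node_dict : List (String × String))
    (st : PySem.Set String × PySem.Dict String Int × PySem.Dict String String × PySem.Dict String Int × Int)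
    (item : String × String) :
    PySem.Set String × PySem.Dict String Int × PySem.Dict String String × PySem.Dict String Int × Int :=
  let node_set := st.1
  let uuid_id_dict := st.2.1
  let uuid_name_dict := st.2.2.1
  let id_name_dict := st.2.2.2.1
  let count := st.2.2.2.2
  let key := item.1
  let value := (PySem.Dict.mk node_dict).getD key ""
  let t := if (PySem.Set.contains node_set value) = false then
             (PySem.Set.add node_set value, id_name_dict.insert value count, count + 1)
           else (node_set, id_name_dict, count)
  let node_set := t.1
  let id_name_dict := t.2.1
  let count := t.2.2
  let uuid_name_dict := uuid_name_dict.insert key value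
  let uuid_id_dict := uuid_id_dict.insert key (id_name_dict.getD (uuid_name_dict.getD key "") 0)
  (node_set, uuid_id_dict, uuid_name_dict, id_name_dict, count)

def generate_node_dict (node_dict : List (String × String)) : (List (String × Int)) × (List (String × String)) × (List (String × Int)) :=
  let st := node_dict.foldl (bodyA node_dict)
    (PySem.Set.empty, PySem.Dict.empty, PySem.Dict.empty, PySem.Dict.empty, 0)
  (st.2.1.items, st.2.2.1.items, st.2.2.2.1.items)

-- ===== PORT B =====
-- names[:names.index(v)] with v always present (getD 0 unreachable); len(set(..)) = Set.len ∘ Set.ofList;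
-- dict.fromkeys(names) as ordered dedup = PySem.List.dedup.
def generate_node_dict_alt (node_dict : List (String × String)) : (List (String × Int)) × (List (String × String)) × (List (String × Int)) :=
  let names := (PySem.Dict.mk node_dict).values
  let uuid_name_dict := PySem.Dict.ofList node_dict
  let id_name_dict := PySem.Dict.ofList ((PySem.List.dedup names).map
    (fun v => (v, (PySem.Set.len (PySem.Set.ofList (PySem.List.slice names none (some (((PySem.List.index? names v).getD 0 : Nat) : Int)))) : Int))))
  let uuid_id_dict := PySem.Dict.ofList ((PySem.Dict.mk node_dict).items.map (fun p => (p.1, id_name_dict.getD p.2 0)))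
  (uuid_id_dict.items, uuid_name_dict.items, id_name_dict.items)

-- ===== PRECONDITION & SPEC =====
-- Pre_ excludes association lists with duplicate keys: a Python dict can never contain them, so on such
-- lists the behaviour is an artefact of the dict→list encoding, not of either Python program.
def Pre_generate_node_dict (node_dict : List (String × String)) : Prop :=
  node_dict.map Prod.fst = PySem.List.dedup (node_dict.map Prod.fst)

instance (node_dict : List (String × String)) : Decidable (Pre_generate_node_dict node_dict) := by
  unfold Pre_generate_node_dict; infer_instance

def pvWitness_generate_node_dict : (List (String × String)) := [("u1", "n1"), ("u2", "n2"), ("u3", "n1")]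

def Spec_generate_node_dict (node_dict : List (String × String)) (out : (List (String × Int)) × (List (String × String)) × (List (String × Int))) : Prop := out = generate_node_dict_alt node_dict
instance (node_dict : List (String × String)) (out : (List (String × Int)) × (List (String × String)) × (List (String × Int))) : Decidable (Spec_generate_node_dict node_dict out) := by unfold Spec_generate_node_dict; infer_instance

-- ===== CLAIM (what is proved, stated in full; the proofs are below) =====
def Claim_equal_generate_node_dict : Prop := ∀ (node_dict : List (String × String)), Dom_generate_node_dict node_dict → Pre_generate_node_dict node_dict → Spec_generate_node_dict node_dict (generate_node_dict node_dict)

-- ===== LEMMAS AND PROOFS =====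

-- A's running id dict as a setdefault-fold over the value list (what A's loop maintains:
-- count always equals the dict's size).
def idfold (vs : List String) : PySem.Dict String Int :=
  vs.foldl (fun (d : PySem.Dict String Int) v => d.setdefault v ((d.size : Int))) PySem.Dict.empty

-- B's closed-form id of v in vs (the inline expression of generate_node_dict_alt, named).
def cnt (vs : List String) (v : String) : Int :=
  ((PySem.Set.len (PySem.Set.ofList (PySem.List.slice vs none (some (((PySem.List.index? vs v).getD 0 : Nat) : Int)))) : Int))

-- B's id dict.
def iddict (vs : List String) : PySem.Dict String Int :=
  PySem.Dict.ofList ((PySem.List.dedup vs).map (fun v => (v, cnt vs v)))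

-- A's loop body with the always-successful lookup node_dict[item] replaced by the pair's own value.
def stepA (st : PySem.Set String × PySem.Dict String Int × PySem.Dict String String × PySem.Dict String Int × Int)
    (item : String × String) :
    PySem.Set String × PySem.Dict String Int × PySem.Dict String String × PySem.Dict String Int × Int :=
  let node_set := st.1
  let uuid_id_dict := st.2.1
  let uuid_name_dict := st.2.2.1
  let id_name_dict := st.2.2.2.1
  let count := st.2.2.2.2
  let key := item.1
  let value := item.2
  let t := if (PySem.Set.contains node_set value) = false then
             (PySem.Set.add node_set value, id_name_dict.insert value count, count + 1)
           else (node_set, id_name_dict, count)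
  let node_set := t.1
  let id_name_dict := t.2.1
  let count := t.2.2
  let uuid_name_dict := uuid_name_dict.insert key value
  let uuid_id_dict := uuid_id_dict.insert key (id_name_dict.getD (uuid_name_dict.getD key "") 0)
  (node_set, uuid_id_dict, uuid_name_dict, id_name_dict, count)

theorem set_add_of_contains {α : Type} [BEq α] (s : PySem.Set α) (x : α)
    (h : PySem.Set.contains s x = true) : PySem.Set.add s x = s := by
  have h' : List.contains s x = true := h
  simp [PySem.Set.add, h']

theorem setdefault_of_contains {κ ν : Type} [BEq κ] (d : PySem.Dict κ ν) (k : κ) (v : ν)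
    (h : d.contains k = true) : d.setdefault k v = d := by
  simp [PySem.Dict.setdefault, h]

theorem setdefault_of_not_contains {κ ν : Type} [BEq κ] (d : PySem.Dict κ ν) (k : κ) (v : ν)
    (h : d.contains k = false) : d.setdefault k v = d.insert k v := by
  simp [PySem.Dict.setdefault, PySem.Dict.insert, h]

theorem contains_idstep (d : PySem.Dict String Int) (w v : String) (x : Int) :
    (d.setdefault w x).contains v = (v == w || d.contains v) := by
  by_cases hc : d.contains w = true
  · rw [setdefault_of_contains d w x hc]
    by_cases hv : v = w
    · subst hv; simp [hc]
    · simp [hv]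
  · rw [setdefault_of_not_contains d w x (by simpa using hc)]
    exact PySem.Dict.contains_insert d w v x

theorem contains_foldl_idstep (vs : List String) (v : String) :
    ∀ (d : PySem.Dict String Int),
      (vs.foldl (fun (d : PySem.Dict String Int) w => d.setdefault w ((d.size : Int))) d).contains v
        = (d.contains v || decide (v ∈ vs)) := by
  induction vs with
  | nil => intro d; simp
  | cons w vs ih =>
      intro d
      simp only [List.foldl_cons, ih, contains_idstep, List.mem_cons]
      by_cases hv : v = w
      · simp [hv]
      · have hb : (v == w) = false := beq_eq_false_iff_ne.mpr hv
        simp [hv, hb]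

theorem contains_idfold (vs : List String) (v : String) :
    (idfold vs).contains v = decide (v ∈ vs) := by
  simpa [PySem.Dict.contains_empty] using contains_foldl_idstep vs v PySem.Dict.empty

theorem idfold_append (vs : List String) (w : String) :
    idfold (vs ++ [w]) = (idfold vs).setdefault w (((idfold vs).size : Int)) := by
  simp [idfold, List.foldl_append]

theorem dict_ofList_append (l : List (String × String)) (p : String × String) :
    PySem.Dict.ofList (l ++ [p]) = (PySem.Dict.ofList l).insert p.1 p.2 := by
  simp [PySem.Dict.ofList, PySem.Dict.update, List.foldl_append]

theorem dict_ofList_append' (l : List (String × Int)) (p : String × Int) :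
    PySem.Dict.ofList (l ++ [p]) = (PySem.Dict.ofList l).insert p.1 p.2 := by
  simp [PySem.Dict.ofList, PySem.Dict.update, List.foldl_append]

theorem items_ofList_nodup (l : List (String × String)) (h : (l.map Prod.fst).Nodup) :
    (PySem.Dict.ofList l).items = l := by
  have := PySem.Dict.items_foldl_insert_fresh l Prod.fst Prod.snd PySem.Dict.empty
    (fun a _ => PySem.Dict.contains_empty _) h
  simpa [PySem.Dict.ofList, PySem.Dict.update] using this

theorem items_ofList_nodup' (l : List (String × Int)) (h : (l.map Prod.fst).Nodup) :
    (PySem.Dict.ofList l).items = l := by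
  have := PySem.Dict.items_foldl_insert_fresh l Prod.fst Prod.snd PySem.Dict.empty
    (fun a _ => PySem.Dict.contains_empty _) h
  simpa [PySem.Dict.ofList, PySem.Dict.update] using this

-- cnt depends only on the prefix of vs up to v's first occurrence.
theorem cnt_append_of_mem (vs : List String) (w v : String) (hv : v ∈ vs) :
    cnt (vs ++ [w]) v = cnt vs v := by
  obtain ⟨k, hk⟩ := Option.isSome_iff_exists.mp ((PySem.List.index?_isSome_iff vs v).mpr hv)
  have hidx : PySem.List.index? (vs ++ [w]) v = some k := by
    rw [PySem.List.index?_append_of_mem [w] hv, hk]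
  obtain ⟨hklt, -, -⟩ := PySem.List.getElem_of_index?_eq_some hk
  unfold cnt
  rw [hidx, hk]
  simp only [Option.getD_some, PySem.List.slice_to_natCast]
  rw [List.take_append_of_le_length (le_of_lt hklt)]

-- the id B assigns to a fresh value is the number of distinct earlier values.
theorem cnt_append_self (vs : List String) (w : String) (hw : w ∉ vs) :
    cnt (vs ++ [w]) w = ((PySem.Set.ofList vs).length : Int) := by
  unfold cnt
  rw [PySem.List.index?_append_singleton_self vs w hw]
  simp only [Option.getD_some, PySem.List.slice_to_natCast]
  rw [List.take_append_of_le_length (le_refl vs.length), List.take_length]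
  rfl

theorem nodup_keys_map_cnt (vs ws : List String) (h : (PySem.Set.ofList vs).Nodup) :
    (((PySem.Set.ofList vs).map (fun v => (v, cnt ws v))).map Prod.fst).Nodup := by
  have hcomp : (Prod.fst ∘ fun v : String => (v, cnt ws v)) = id := rfl
  rw [List.map_map, hcomp, List.map_id]
  exact h

theorem size_iddict (vs : List String) : (iddict vs).size = (PySem.Set.ofList vs).length := by
  unfold iddict
  have h := items_ofList_nodup' ((PySem.List.dedup vs).map (fun v => (v, cnt vs v)))
    (by simp only [PySem.List.dedup_eq_ofList]
        exact nodup_keys_map_cnt vs vs (PySem.Set.nodup_ofList vs))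
  simp only [PySem.List.dedup_eq_ofList] at h
  simp only [PySem.Dict.size, PySem.List.dedup_eq_ofList, h, List.length_map]

-- the bridge: A's running id dict equals B's closed-form id dict.
theorem idfold_eq_iddict (vs : List String) : idfold vs = iddict vs := by
  induction vs using List.reverseRecOn with
  | nil => rfl
  | append_singleton vs w ih =>
      rw [idfold_append, ih]
      by_cases hw : w ∈ vs
      · have hcI : (iddict vs).contains w = true := by
          rw [← ih, contains_idfold]; simpa using hw
        rw [setdefault_of_contains _ _ _ hcI]
        unfold iddict
        have hset : PySem.Set.ofList (vs ++ [w]) = PySem.Set.ofList vs := by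
          rw [PySem.Set.ofList_append_singleton, set_add_of_contains]
          simp [PySem.Set.contains, PySem.Set.mem_ofList, hw]
        have hmap : (PySem.Set.ofList vs).map (fun v => (v, cnt (vs ++ [w]) v))
            = (PySem.Set.ofList vs).map (fun v => (v, cnt vs v)) := by
          refine List.map_congr_left (fun v hv => ?_)
          rw [cnt_append_of_mem vs w v ((PySem.Set.mem_ofList vs v).mp hv)]
        simp only [PySem.List.dedup_eq_ofList, hset, hmap]
      · have hcI : (iddict vs).contains w = false := by
          rw [← ih, contains_idfold]; simpa using hw
        rw [setdefault_of_not_contains _ _ _ hcI, size_iddict]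
        unfold iddict
        have hset : PySem.Set.ofList (vs ++ [w]) = PySem.Set.ofList vs ++ [w] := by
          rw [PySem.Set.ofList_append_singleton]
          simp [PySem.Set.add, PySem.Set.contains, PySem.Set.mem_ofList, hw]
        have hmap : (PySem.Set.ofList vs).map (fun v => (v, cnt (vs ++ [w]) v))
            = (PySem.Set.ofList vs).map (fun v => (v, cnt vs v)) := by
          refine List.map_congr_left (fun v hv => ?_)
          rw [cnt_append_of_mem vs w v ((PySem.Set.mem_ofList vs v).mp hv)]
        simp only [PySem.List.dedup_eq_ofList, hset, List.map_append, List.map_cons,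
          List.map_nil, hmap, cnt_append_self vs w hw]
        rw [dict_ofList_append']

-- Loop invariant of A's (lookup-free) loop.
theorem stepA_invariant (l : List (String × String)) :
    l.foldl stepA (PySem.Set.empty, PySem.Dict.empty, PySem.Dict.empty, PySem.Dict.empty, 0) =
      (PySem.Set.ofList (l.map Prod.snd),
       PySem.Dict.ofList (l.map (fun p => (p.1, (idfold (l.map Prod.snd)).getD p.2 0))),
       PySem.Dict.ofList l,
       idfold (l.map Prod.snd),
       (((idfold (l.map Prod.snd)).size : Int))) := by
  induction l using List.reverseRecOn with
  | nil => rfl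
  | append_singleton l p ih =>
      rw [List.foldl_append, List.foldl_cons, List.foldl_nil, ih]
      simp only [List.map_append, List.map_cons, List.map_nil]
      rw [idfold_append]
      by_cases hm : p.2 ∈ l.map Prod.snd
      · have hcS : PySem.Set.contains (PySem.Set.ofList (l.map Prod.snd)) p.2 = true := by
          simp [PySem.Set.contains, PySem.Set.mem_ofList, hm]
        have hcI : (idfold (l.map Prod.snd)).contains p.2 = true := by
          simp [contains_idfold, hm]
        rw [setdefault_of_contains _ _ _ hcI]
        simp only [stepA, hcS, Bool.true_eq_false, if_false]
        refine congrArg₂ Prod.mk ?_ (congrArg₂ Prod.mk ?_ (congrArg₂ Prod.mk ?_ rfl))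
        · rw [PySem.Set.ofList_append_singleton, set_add_of_contains _ _ hcS]
        · rw [dict_ofList_append']
          simp [PySem.Dict.getD_insert_self]
        · rw [dict_ofList_append]
      · have hcS : PySem.Set.contains (PySem.Set.ofList (l.map Prod.snd)) p.2 = false := by
          simp [PySem.Set.contains, PySem.Set.mem_ofList, hm]
        have hcI : (idfold (l.map Prod.snd)).contains p.2 = false := by
          simp [contains_idfold, hm]
        rw [setdefault_of_not_contains _ _ _ hcI]
        simp only [stepA, hcS, if_true]
        refine congrArg₂ Prod.mk ?_ (congrArg₂ Prod.mk ?_ (congrArg₂ Prod.mk ?_ (congrArg₂ Prod.mk ?_ ?_)))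
        · rw [PySem.Set.ofList_append_singleton]
        · rw [dict_ofList_append']
          have hmap : l.map (fun q => (q.1, ((idfold (l.map Prod.snd)).insert p.2 ((idfold (l.map Prod.snd)).size : Int)).getD q.2 0))
              = l.map (fun q => (q.1, (idfold (l.map Prod.snd)).getD q.2 0)) := by
            refine List.map_congr_left (fun q hq => ?_)
            have hne : q.2 ≠ p.2 := by
              intro h; exact hm (h ▸ List.mem_map_of_mem hq)
            rw [PySem.Dict.getD_insert_of_ne _ _ _ hne]
          rw [hmap]
          simp [PySem.Dict.getD_insert_self]
        · rw [dict_ofList_append]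
        · rfl
        · rw [PySem.Dict.size_insert, hcI]
          simp

theorem generate_node_dict_eq_alt (node_dict : List (String × String))
    (hpre : (node_dict.map Prod.fst).Nodup) :
    generate_node_dict node_dict = generate_node_dict_alt node_dict := by
  have hlk : ∀ x ∈ node_dict, (PySem.Dict.mk node_dict).getD x.1 "" = x.2 := by
    intro x hx
    exact PySem.Dict.getD_of_mem_items (d := PySem.Dict.mk node_dict)
      (by simpa using hx) (by simpa [PySem.Dict.keys_mk] using hpre) ""
  have hfun : ∀ acc, ∀ x ∈ node_dict, bodyA node_dict acc x = stepA acc x := by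
    intro acc x hx
    simp only [bodyA, stepA, hlk x hx]
  have hfold := PySem.List.foldl_congr_mem node_dict (bodyA node_dict) stepA
    (PySem.Set.empty, PySem.Dict.empty, PySem.Dict.empty, PySem.Dict.empty, 0) hfun
  unfold generate_node_dict generate_node_dict_alt
  rw [hfold, stepA_invariant]
  have hitems := items_ofList_nodup node_dict hpre
  have hbridge := idfold_eq_iddict (node_dict.map Prod.snd)
  simp only [hitems, PySem.Dict.values, hbridge, iddict, cnt]

-- ===== VERDICT (by name: the statement is the Claim_ definition above) =====
theorem generate_node_dict_spec : Claim_equal_generate_node_dict := by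
  intro node_dict _hdom hpre
  have hnodup : (node_dict.map Prod.fst).Nodup := by
    rw [hpre]
    simp only [PySem.List.dedup_eq_ofList]
    exact PySem.Set.nodup_ofList _
  exact generate_node_dict_eq_alt node_dict hnodup
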